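-- pv_equiv track=rewrite | github.com/softwareone-platform/optscale | docker_images/herald_executor/worker.py | _merge_env_properties
-- ===== SOURCE A (Python) =====
-- def _merge_env_properties(old_value_map, new_value_map):
--     merged_map = {k: {'name': k, 'previous_value': v, 'new_value': ''}
--                   for k, v in old_value_map.items()
--                   }
--     for k, v in new_value_map.items():
--         previous_value = old_value_map.get(k, '')
--         merged_map[k] = {
--             'name': k,
--             'previous_value': previous_value,
--             'new_value': v
--         }
--     return [val for val in merged_map.values()
--             if val['previous_value'] != val['new_value']]
-- ===== SOURCE B (Python) =====
-- def _merge_env_properties(old_value_map, new_value_map):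
--     changed = []
--     for k, v in old_value_map.items():
--         nv = new_value_map.get(k, '')
--         if v != nv:
--             changed.append({'name': k, 'previous_value': v, 'new_value': nv})
--     for k, v in new_value_map.items():
--         if k not in old_value_map and v != '':
--             changed.append({'name': k, 'previous_value': '', 'new_value': v})
--     return changed
-- ===== Notes on version B (the rewrite author's own statement) =====
-- stated objective: simpler
-- what changed: B never builds A's intermediate merged_map of full records: it emits the final changed records directly in two specialized passes -- over old items (previous value is the item's own value, change test v != new.get(k,'')) and over new items (only keys absent from old, change test v != '') -- so unchanged keys never allocate a record.
import Mathlib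
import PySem

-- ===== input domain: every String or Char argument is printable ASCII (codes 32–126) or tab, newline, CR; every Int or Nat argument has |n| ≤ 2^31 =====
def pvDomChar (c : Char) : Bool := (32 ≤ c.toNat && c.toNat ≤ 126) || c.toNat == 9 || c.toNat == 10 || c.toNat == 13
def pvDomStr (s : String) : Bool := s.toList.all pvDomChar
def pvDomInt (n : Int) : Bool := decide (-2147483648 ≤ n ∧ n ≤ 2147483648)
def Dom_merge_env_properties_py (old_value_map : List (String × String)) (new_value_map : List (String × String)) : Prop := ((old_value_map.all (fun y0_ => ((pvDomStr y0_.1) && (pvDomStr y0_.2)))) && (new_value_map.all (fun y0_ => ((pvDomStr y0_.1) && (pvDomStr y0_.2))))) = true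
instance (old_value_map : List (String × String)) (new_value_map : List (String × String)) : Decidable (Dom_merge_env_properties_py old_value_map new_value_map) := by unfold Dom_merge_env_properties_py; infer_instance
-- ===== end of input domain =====

-- B skips A's intermediate merged_map of full records: two specialized passes emit the final changed records directly (simpler decomposition, same cost).


-- ===== PORT A =====
def merge_env_properties_py (old_value_map : List (String × String)) (new_value_map : List (String × String)) : List (List (String × String)) :=
  let merged0 : PySem.Dict String (List (String × String)) :=
    old_value_map.foldl (fun d kv =>
      d.insert kv.1 [("name", kv.1), ("previous_value", kv.2), ("new_value", "")]) PySem.Dict.empty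
  let merged : PySem.Dict String (List (String × String)) :=
    new_value_map.foldl (fun d kv =>
      let previous_value := (PySem.Dict.mk old_value_map).getD kv.1 ""
      d.insert kv.1 [("name", kv.1), ("previous_value", previous_value), ("new_value", kv.2)]) merged0
  merged.values.filter (fun val =>
    (PySem.Dict.mk val).get? "previous_value" != (PySem.Dict.mk val).get? "new_value")

-- ===== PORT B =====  (two passes: changed old items, then changed new-only items)
def merge_env_properties_py_alt (old_value_map : List (String × String)) (new_value_map : List (String × String)) : List (List (String × String)) :=
  let changed : List (List (String × String)) :=
    old_value_map.foldl (fun changed kv =>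
      let nv := (PySem.Dict.mk new_value_map).getD kv.1 ""
      if kv.2 != nv then
        changed ++ [[("name", kv.1), ("previous_value", kv.2), ("new_value", nv)]]
      else changed) []
  new_value_map.foldl (fun changed kv =>
    if !(PySem.Dict.mk old_value_map).contains kv.1 && kv.2 != "" then
      changed ++ [[("name", kv.1), ("previous_value", ""), ("new_value", kv.2)]]
    else changed) changed

-- ===== PRECONDITION & SPEC =====
-- The Python arguments are dicts; Pre_ excludes only association lists with duplicate keys,
-- which represent no Python dict input (there A's last-value-wins and B's first-match lookups disagree).
def Pre_merge_env_properties_py (old_value_map : List (String × String)) (new_value_map : List (String × String)) : Prop :=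
  (old_value_map.map Prod.fst).Nodup ∧ (new_value_map.map Prod.fst).Nodup
instance (old_value_map : List (String × String)) (new_value_map : List (String × String)) : Decidable (Pre_merge_env_properties_py old_value_map new_value_map) := by unfold Pre_merge_env_properties_py; infer_instance

def pvWitness_merge_env_properties_py : (List (String × String)) × (List (String × String)) :=
  ([("a", "1"), ("b", "2")], [("a", "3"), ("c", "2")])

def Spec_merge_env_properties_py (old_value_map : List (String × String)) (new_value_map : List (String × String)) (out : List (List (String × String))) : Prop := out = merge_env_properties_py_alt old_value_map new_value_map
instance (old_value_map : List (String × String)) (new_value_map : List (String × String)) (out : List (List (String × String))) : Decidable (Spec_merge_env_properties_py old_value_map new_value_map out) := by unfold Spec_merge_env_properties_py; infer_instance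

-- ===== CLAIM (what is proved, stated in full; the proofs are below) =====
def Claim_equal_merge_env_properties_py : Prop := ∀ (old_value_map : List (String × String)) (new_value_map : List (String × String)), Dom_merge_env_properties_py old_value_map new_value_map → Pre_merge_env_properties_py old_value_map new_value_map → Spec_merge_env_properties_py old_value_map new_value_map (merge_env_properties_py old_value_map new_value_map)

-- ===== LEMMAS AND PROOFS =====

-- the uniform entry for key k
def pvE (old_value_map new_value_map : List (String × String)) (k : String) : List (String × String) :=
  [("name", k), ("previous_value", (PySem.Dict.mk old_value_map).getD k ""),
   ("new_value", (PySem.Dict.mk new_value_map).getD k "")]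

-- a fold inserting (k, G k) for distinct keys ks: old keys get overwritten in place, fresh keys append
theorem pv_items_foldl_insertG {τ : Type} (ks : List String) (G : String → τ)
    (d : PySem.Dict String τ) (hd : d.keys.Nodup) (hks : ks.Nodup) :
    (ks.foldl (fun d k => d.insert k (G k)) d).items
      = d.items.map (fun p => if p.1 ∈ ks then (p.1, G p.1) else p)
        ++ (ks.filter (fun k => !d.contains k)).map (fun k => (k, G k)) := by
  induction ks generalizing d with
  | nil => simp
  | cons k ks ih =>
    rcases List.nodup_cons.mp hks with ⟨hk, hks'⟩
    have hd' : (d.insert k (G k)).keys.Nodup := PySem.Dict.nodup_keys_insert d k (G k) hd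
    simp only [List.foldl_cons]
    rw [ih (d.insert k (G k)) hd' hks']
    have hfc : (ks.filter fun k' => !(d.insert k (G k)).contains k')
        = ks.filter fun k' => !d.contains k' := by
      apply List.filter_congr
      intro k' hk'
      have : k' ≠ k := fun h => hk (h ▸ hk')
      simp [PySem.Dict.contains_insert, this]
    rw [hfc]
    by_cases hc : d.contains k = true
    · rw [PySem.Dict.items_insert_of_contains _ _ hc,
        List.filter_cons_of_neg (by simp [hc])]
      congr 1
      rw [List.map_map]
      apply List.map_congr_left
      intro p hp
      by_cases hpk : p.1 = k
      · simp [hpk, hk]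
      · simp [Function.comp, hpk]
    · rw [PySem.Dict.items_insert_of_not_contains _ _ (by simpa using hc),
        List.filter_cons_of_pos (by simp [hc]), List.map_append]
      have hA : d.items.map (fun p => if p.1 ∈ ks then (p.1, G p.1) else p)
          = d.items.map (fun p => if p.1 ∈ k :: ks then (p.1, G p.1) else p) := by
        apply List.map_congr_left
        intro p hp
        have hpk : p.1 ≠ k := by
          intro h
          exact hc ((PySem.Dict.contains_iff_mem_keys _ _).mpr
            (h ▸ PySem.Dict.mem_keys_of_mem_items _ hp))
        simp [hpk]
      rw [hA]
      simp [hk]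

theorem pv_merged_items (old_value_map new_value_map : List (String × String))
    (ho : (old_value_map.map Prod.fst).Nodup) (hn : (new_value_map.map Prod.fst).Nodup) :
    (new_value_map.foldl (fun d kv =>
        d.insert kv.1 [("name", kv.1), ("previous_value", (PySem.Dict.mk old_value_map).getD kv.1 ""),
                       ("new_value", kv.2)])
      (old_value_map.foldl (fun d kv =>
        d.insert kv.1 [("name", kv.1), ("previous_value", kv.2), ("new_value", "")]) PySem.Dict.empty)).items
    = (old_value_map.map Prod.fst
        ++ (new_value_map.map Prod.fst).filter (fun k => !(PySem.Dict.mk old_value_map).contains k)).map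
        (fun k => (k, pvE old_value_map new_value_map k)) := by
  -- stage 1: the old-map comprehension
  have h0 : (old_value_map.foldl (fun d kv =>
      d.insert kv.1 [("name", kv.1), ("previous_value", kv.2), ("new_value", "")]) PySem.Dict.empty).items
      = old_value_map.map (fun kv => (kv.1, [("name", kv.1), ("previous_value", kv.2), ("new_value", "")])) := by
    rw [PySem.Dict.items_foldl_insert_fresh _ _ _ _ (fun a _ => PySem.Dict.contains_empty _) ho]
    rfl
  set m0 := old_value_map.foldl (fun d kv =>
      d.insert kv.1 [("name", kv.1), ("previous_value", kv.2), ("new_value", "")]) PySem.Dict.empty with hm0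
  have hkeys0 : m0.keys = old_value_map.map Prod.fst := by
    show m0.items.map Prod.fst = _
    rw [h0, List.map_map]; rfl
  have hnd0 : m0.keys.Nodup := by rw [hkeys0]; exact ho
  -- stage 2: rewrite the new-map loop as a fold over its keys with the uniform entry pvE
  have hstep : new_value_map.foldl (fun d kv =>
        d.insert kv.1 [("name", kv.1), ("previous_value", (PySem.Dict.mk old_value_map).getD kv.1 ""),
                       ("new_value", kv.2)]) m0
      = (new_value_map.map Prod.fst).foldl (fun d k => d.insert k (pvE old_value_map new_value_map k)) m0 := by
    rw [List.foldl_map]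
    apply PySem.List.foldl_congr_mem
    intro d kv hkv
    have hv : (PySem.Dict.mk new_value_map).getD kv.1 "" = kv.2 :=
      PySem.Dict.getD_of_mem_items _ (by simpa using hkv) (by simpa using hn) ""
    simp [pvE, hv]
  rw [hstep, pv_items_foldl_insertG _ _ _ hnd0 hn, h0]
  have hcont : ∀ k, m0.contains k = (PySem.Dict.mk old_value_map).contains k := by
    intro k
    rw [PySem.Dict.contains_eq_decide_mem_keys, PySem.Dict.contains_eq_decide_mem_keys, hkeys0]
    simp
  rw [List.map_append, List.map_map]
  congr 1
  · -- the old-key prefix: every old entry equals pvE of its key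
    rw [List.map_map]
    apply List.map_congr_left
    intro kv hkv
    have hvo : (PySem.Dict.mk old_value_map).getD kv.1 "" = kv.2 :=
      PySem.Dict.getD_of_mem_items _ (by simpa using hkv) (by simpa using ho) ""
    by_cases h : kv.1 ∈ new_value_map.map Prod.fst
    · simp [Function.comp, h]
    · have hvn : (PySem.Dict.mk new_value_map).getD kv.1 "" = "" := by
        apply PySem.Dict.getD_of_not_contains
        rw [PySem.Dict.contains_eq_decide_mem_keys]
        simpa using h
      simp [Function.comp, h, pvE, hvo, hvn]
  · -- the fresh new-only keys
    congr 1
    apply List.filter_congr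
    intro k _
    rw [hcont]

theorem merge_env_properties_eq (old_value_map new_value_map : List (String × String))
    (ho : (old_value_map.map Prod.fst).Nodup) (hn : (new_value_map.map Prod.fst).Nodup) :
    merge_env_properties_py old_value_map new_value_map
      = merge_env_properties_py_alt old_value_map new_value_map := by
  unfold merge_env_properties_py merge_env_properties_py_alt
  simp only [PySem.List.foldl_append_if]
  rw [show ∀ (d : PySem.Dict String (List (String × String))), d.values = d.items.map Prod.snd
        from fun d => rfl]
  rw [pv_merged_items old_value_map new_value_map ho hn, List.map_map, List.filter_map,
    List.nil_append]
  have hc : ∀ k, ((fun val => (PySem.Dict.mk val).get? "previous_value" != (PySem.Dict.mk val).get? "new_value") ∘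
        ((Prod.snd : String × List (String × String) → List (String × String)) ∘ fun k => (k, pvE old_value_map new_value_map k))) k
      = ((PySem.Dict.mk old_value_map).getD k "" != (PySem.Dict.mk new_value_map).getD k "") := by
    intro k
    simp [pvE, PySem.Dict.get?, bne]
  rw [funext hc, show (Prod.snd ∘ fun k => (k, pvE old_value_map new_value_map k))
        = pvE old_value_map new_value_map from rfl]
  rw [List.filter_append, List.map_append]
  have hbne : ∀ a b : String, (a != b) = (b != a) := fun a b => by simp [bne, eq_comm]
  congr 1
  · -- old-key pass
    rw [List.filter_map, List.map_map]
    have hf : old_value_map.filter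
          ((fun k => (PySem.Dict.mk old_value_map).getD k "" != (PySem.Dict.mk new_value_map).getD k "") ∘ Prod.fst)
        = old_value_map.filter (fun x => x.2 != (PySem.Dict.mk new_value_map).getD x.1 "") := by
      apply List.filter_congr
      intro kv hkv
      have hvo : (PySem.Dict.mk old_value_map).getD kv.1 "" = kv.2 :=
        PySem.Dict.getD_of_mem_items _ (by simpa using hkv) (by simpa using ho) ""
      simp [Function.comp, hvo]
    rw [hf]
    apply List.map_congr_left
    intro kv hkv
    have hvo : (PySem.Dict.mk old_value_map).getD kv.1 "" = kv.2 :=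
      PySem.Dict.getD_of_mem_items _ (by simpa using (List.mem_of_mem_filter hkv)) (by simpa using ho) ""
    simp [Function.comp, pvE, hvo]
  · -- new-only pass
    rw [List.filter_filter, List.filter_map, List.map_map]
    have hf : new_value_map.filter
          ((fun a => ((PySem.Dict.mk old_value_map).getD a "" != (PySem.Dict.mk new_value_map).getD a "")
              && !(PySem.Dict.mk old_value_map).contains a) ∘ Prod.fst)
        = new_value_map.filter (fun x => !(PySem.Dict.mk old_value_map).contains x.1 && x.2 != "") := by
      apply List.filter_congr
      intro kv hkv
      have hvn : (PySem.Dict.mk new_value_map).getD kv.1 "" = kv.2 :=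
        PySem.Dict.getD_of_mem_items _ (by simpa using hkv) (by simpa using hn) ""
      by_cases hco : (PySem.Dict.mk old_value_map).contains kv.1 = true
      · simp [Function.comp, hco]
      · have hvo : (PySem.Dict.mk old_value_map).getD kv.1 "" = "" :=
          PySem.Dict.getD_of_not_contains _ _ (eq_false_of_ne_true hco)
        simp [Function.comp, hco, hvo, hvn, hbne]
    rw [hf]
    apply List.map_congr_left
    intro kv hkv
    have hmem := List.mem_of_mem_filter hkv
    have hco : (PySem.Dict.mk old_value_map).contains kv.1 = false := by
      have h2 := (List.mem_filter.mp hkv).2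
      rcases Bool.and_eq_true_iff.mp h2 with ⟨h3, _⟩
      simpa using h3
    have hvo : (PySem.Dict.mk old_value_map).getD kv.1 "" = "" :=
      PySem.Dict.getD_of_not_contains _ _ hco
    have hvn : (PySem.Dict.mk new_value_map).getD kv.1 "" = kv.2 :=
      PySem.Dict.getD_of_mem_items _ (by simpa using hmem) (by simpa using hn) ""
    simp [pvE, hvo, hvn]

-- ===== VERDICT (by name: the statement is the Claim_ definition above) =====
theorem merge_env_properties_py_spec : Claim_equal_merge_env_properties_py := by
  intro old_value_map new_value_map _ hpre
  exact merge_env_properties_eq _ _ hpre.1 hpre.2
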